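-- pv_equiv track=rewrite | github.com/JuanTrentinTelli/ghostopcode | modules/whois_scan.py | is_brazilian_domain
-- ===== SOURCE A (Python) =====
-- def is_brazilian_domain(domain: str) -> bool:
--     """
--     Returns True if domain uses a Brazilian ccTLD.
--     Brazilian TLDs: .com.br, .org.br, .net.br, .edu.br,
--                     .gov.br, .mil.br, .b.br, .ind.br
--     """
--     br_tlds = (
--         ".com.br",
--         ".org.br",
--         ".net.br",
--         ".edu.br",
--         ".gov.br",
--         ".mil.br",
--         ".b.br",
--         ".ind.br",
--         ".br",
--     )
--     d = domain.lower().strip()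
--     return any(d.endswith(tld) for tld in br_tlds)
-- ===== SOURCE B (Python) =====
-- def is_brazilian_domain(domain: str) -> bool:
--     # All Brazilian ccTLD suffixes end in ".br" (and ".br" itself is one),
--     # so a single suffix test is exact.
--     return domain.lower().strip().endswith(".br")
-- ===== Notes on version B (the rewrite author's own statement) =====
-- stated objective: simpler
-- what changed: Replaced the any() loop over nine Brazilian TLD suffixes by a single endswith('.br') test, since every suffix in the tuple ends in '.br' and '.br' itself is in the tuple.
import Mathlib
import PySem

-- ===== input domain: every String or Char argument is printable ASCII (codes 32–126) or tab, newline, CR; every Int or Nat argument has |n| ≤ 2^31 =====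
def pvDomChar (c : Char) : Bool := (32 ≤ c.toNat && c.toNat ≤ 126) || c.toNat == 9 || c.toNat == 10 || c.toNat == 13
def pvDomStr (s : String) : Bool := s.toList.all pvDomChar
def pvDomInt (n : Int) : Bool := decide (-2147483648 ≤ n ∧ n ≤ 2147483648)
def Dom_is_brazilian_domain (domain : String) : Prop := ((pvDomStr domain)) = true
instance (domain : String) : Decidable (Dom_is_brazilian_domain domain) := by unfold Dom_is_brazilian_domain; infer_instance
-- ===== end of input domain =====

-- B replaces A's any() over nine suffixes by one endswith(".br") test (simpler; exact because each suffix ends in ".br").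

-- ===== PORT A =====
def is_brazilian_domain (domain : String) : Bool :=
  let br_tlds : List String :=
    [".com.br", ".org.br", ".net.br", ".edu.br", ".gov.br", ".mil.br", ".b.br", ".ind.br", ".br"]
  let d := PySem.Str.strip (PySem.Str.lower domain)
  br_tlds.any (fun tld => PySem.Str.endswith d tld)

-- ===== PORT B =====
def is_brazilian_domain_alt (domain : String) : Bool :=
  PySem.Str.endswith (PySem.Str.strip (PySem.Str.lower domain)) ".br"

-- ===== PRECONDITION & SPEC =====
def Spec_is_brazilian_domain (domain : String) (out : Bool) : Prop := out = is_brazilian_domain_alt domain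
instance (domain : String) (out : Bool) : Decidable (Spec_is_brazilian_domain domain out) := by unfold Spec_is_brazilian_domain; infer_instance

-- ===== CLAIM (what is proved, stated in full; the proofs are below) =====
def Claim_equal_is_brazilian_domain : Prop := ∀ (domain : String), Dom_is_brazilian_domain domain → Spec_is_brazilian_domain domain (is_brazilian_domain domain)

-- ===== LEMMAS AND PROOFS =====

-- any suffix that itself ends in ".br" implies ending in ".br"
theorem endswith_br_of_endswith (L t : List Char)
    (ht : ['.', 'b', 'r'] <:+ t)
    (h : PySem.Chars.endswith L t = true) :
    PySem.Chars.endswith L ['.', 'b', 'r'] = true := by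
  rw [PySem.Chars.endswith_iff] at h ⊢
  exact ht.trans h

theorem str_endswith_br (d : String) (t : String)
    (ht : ['.', 'b', 'r'] <:+ t.toList)
    (h : PySem.Str.endswith d t = true) :
    PySem.Str.endswith d ".br" = true := by
  simp only [PySem.Str.endswith_eq] at h ⊢
  exact endswith_br_of_endswith d.toList t.toList ht h

-- ===== VERDICT (by name: the statement is the Claim_ definition above) =====
theorem is_brazilian_domain_spec : Claim_equal_is_brazilian_domain := by
  intro domain _
  unfold Spec_is_brazilian_domain is_brazilian_domain is_brazilian_domain_alt
  simp only [List.any_cons, List.any_nil, Bool.or_false]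
  set d := PySem.Str.strip (PySem.Str.lower domain) with hd
  cases hbr : PySem.Str.endswith d ".br" with
  | true => simp only [Bool.or_true]
  | false =>
    simp only [Bool.or_false]
    have k : ∀ t : String, ['.', 'b', 'r'] <:+ t.toList → PySem.Str.endswith d t = false := by
      intro t ht
      cases h : PySem.Str.endswith d t with
      | false => rfl
      | true => rw [str_endswith_br d t ht h] at hbr; exact Bool.noConfusion hbr
    rw [k ".com.br" (by decide), k ".org.br" (by decide), k ".net.br" (by decide),
        k ".edu.br" (by decide), k ".gov.br" (by decide), k ".mil.br" (by decide),
        k ".b.br" (by decide), k ".ind.br" (by decide)]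
    rfl
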